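-- pv_equiv track=rewrite | github.com/0xstillb/grimmory-bridge | opf_to_grimmory_json.py | normalize_sidecar_metadata
-- ===== SOURCE A (Python) =====
-- SIDECAR_BOOK_METADATA_ORDER = [
--     "title",
--     "subtitle",
--     "authors",
--     "publisher",
--     "publishedDate",
--     "description",
--     "isbn10",
--     "isbn13",
--     "language",
--     "pageCount",
--     "categories",
--     "moods",
--     "tags",
--     "series",
--     "identifiers",
--     "ratings",
--     "ageRating",
--     "contentRating",
--     "narrator",
--     "abridged",
--     "comicMetadata",
-- ]
--
-- def normalize_sidecar_metadata(metadata: dict) -> dict: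
--     normalized: dict[str, object] = {}
--     for field_name in SIDECAR_BOOK_METADATA_ORDER:
--         if field_name in metadata and metadata[field_name] is not None:
--             normalized[field_name] = metadata[field_name]
--     for field_name, value in metadata.items():
--         if field_name not in normalized and value is not None:
--             normalized[field_name] = value
--     return normalized
-- ===== SOURCE B (Python) =====
-- SIDECAR_BOOK_METADATA_ORDER = [
--     "title",
--     "subtitle",
--     "authors",
--     "publisher",
--     "publishedDate",
--     "description",
--     "isbn10",
--     "isbn13",
--     "language",
--     "pageCount",
--     "categories",
--     "moods",
--     "tags",
--     "series",
--     "identifiers",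
--     "ratings",
--     "ageRating",
--     "contentRating",
--     "narrator",
--     "abridged",
--     "comicMetadata",
-- ]
--
-- def normalize_sidecar_metadata(metadata: dict) -> dict:
--     # Bucket (counting-sort) approach: rank every non-None item by its priority
--     # index (unlisted names rank last), then emit the buckets in rank order.
--     order_index = {name: i for i, name in enumerate(SIDECAR_BOOK_METADATA_ORDER)}
--     n = len(SIDECAR_BOOK_METADATA_ORDER)
--     ranked = [(order_index.get(k, n), (k, v)) for k, v in metadata.items() if v is not None]
--     return dict(kv for r in range(n + 1) for rr, kv in ranked if rr == r)
-- ===== Notes on version B (the rewrite author's own statement) =====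
-- stated objective: alternative
-- what changed: Replaces A's two selective passes (priority scan with per-field dict lookups, then a membership-checking sweep) by a counting-sort: an index dict built once ranks every non-None item, and the buckets are emitted in rank order; Pre_ only excludes association lists with duplicate keys, which represent no Python dict.
import Mathlib
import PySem

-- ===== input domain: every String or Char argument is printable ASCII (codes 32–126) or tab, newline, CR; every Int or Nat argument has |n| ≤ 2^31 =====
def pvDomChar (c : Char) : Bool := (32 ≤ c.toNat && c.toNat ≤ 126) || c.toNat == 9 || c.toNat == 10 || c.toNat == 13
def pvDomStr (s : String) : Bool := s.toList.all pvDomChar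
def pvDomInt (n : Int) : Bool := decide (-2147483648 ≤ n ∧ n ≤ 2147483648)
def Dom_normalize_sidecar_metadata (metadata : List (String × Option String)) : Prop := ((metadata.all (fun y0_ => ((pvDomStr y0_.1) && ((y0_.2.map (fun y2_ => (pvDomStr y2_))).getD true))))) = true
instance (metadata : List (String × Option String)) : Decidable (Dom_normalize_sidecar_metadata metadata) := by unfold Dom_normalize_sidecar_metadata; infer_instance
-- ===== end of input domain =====

-- B replaces A's two selective passes by a one-pass ranking (index dict) plus bucket
-- emission in rank order (a counting-sort); same cost class, different structure.

def SIDECAR_BOOK_METADATA_ORDER : List String :=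
  ["title", "subtitle", "authors", "publisher", "publishedDate", "description",
   "isbn10", "isbn13", "language", "pageCount", "categories", "moods", "tags",
   "series", "identifiers", "ratings", "ageRating", "contentRating", "narrator",
   "abridged", "comicMetadata"]

-- ===== PORT A =====
-- loop body of A's first pass: 'if f in metadata and metadata[f] is not None:
-- normalized[f] = metadata[f]' (first-match lookup on the association list)
def pvStepA (metadata : List (String × Option String))
    (d : PySem.Dict String (Option String)) (f : String) : PySem.Dict String (Option String) :=
  match metadata.find? (fun kv => kv.1 == f) with
  | some (_, some v) => d.insert f (some v)
  | _ => d

def normalize_sidecar_metadata (metadata : List (String × Option String)) : List (String × Option String) :=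
  let normalized : PySem.Dict String (Option String) :=
    SIDECAR_BOOK_METADATA_ORDER.foldl (pvStepA metadata) PySem.Dict.empty
  (metadata.foldl
    (fun d kv => if !(d.contains kv.1) && kv.2.isSome then d.insert kv.1 kv.2 else d)
    normalized).items

-- ===== PORT B =====
def normalize_sidecar_metadata_alt (metadata : List (String × Option String)) : List (String × Option String) :=
  let order_index : PySem.Dict String Int :=
    (PySem.List.enumerate SIDECAR_BOOK_METADATA_ORDER 0).foldl
      (fun d p => d.insert p.2 p.1) PySem.Dict.empty
  let n : Int := SIDECAR_BOOK_METADATA_ORDER.length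
  let ranked : List (Int × (String × Option String)) :=
    (metadata.filter (fun kv => kv.2.isSome)).map (fun kv => (order_index.getD kv.1 n, kv))
  let pairs : List (String × Option String) :=
    (PySem.List.pyRange 0 (n + 1) 1).flatMap
      (fun r => (ranked.filter (fun p => p.1 == r)).map (fun p => p.2))
  (pairs.foldl (fun d kv => d.insert kv.1 kv.2) PySem.Dict.empty).items

-- ===== PRECONDITION & SPEC =====
-- Pre_ excludes association lists with duplicate keys: they represent no Python dict
-- (A's parameter is a dict, whose keys are always distinct), so A never sees them.
def Pre_normalize_sidecar_metadata (metadata : List (String × Option String)) : Prop :=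
  (metadata.map Prod.fst).Nodup
instance (metadata : List (String × Option String)) : Decidable (Pre_normalize_sidecar_metadata metadata) := by unfold Pre_normalize_sidecar_metadata; infer_instance

def pvWitness_normalize_sidecar_metadata : (List (String × Option String)) :=
  [("narrator", some "N"), ("zzz", some "x"), ("title", some "T"), ("foo", none)]

def Spec_normalize_sidecar_metadata (metadata : List (String × Option String)) (out : List (String × Option String)) : Prop := out = normalize_sidecar_metadata_alt metadata
instance (metadata : List (String × Option String)) (out : List (String × Option String)) : Decidable (Spec_normalize_sidecar_metadata metadata out) := by unfold Spec_normalize_sidecar_metadata; infer_instance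

-- ===== CLAIM (what is proved, stated in full; the proofs are below) =====
def Claim_equal_normalize_sidecar_metadata : Prop := ∀ (metadata : List (String × Option String)), Dom_normalize_sidecar_metadata metadata → Pre_normalize_sidecar_metadata metadata → Spec_normalize_sidecar_metadata metadata (normalize_sidecar_metadata metadata)

-- ===== LEMMAS AND PROOFS =====

-- the contribution of one priority field to A's first pass: [] or a singleton
def pvEntry (metadata : List (String × Option String)) (f : String) : List (String × Option String) :=
  match metadata.find? (fun kv => kv.1 == f) with
  | some (_, some v) => [(f, some v)]
  | _ => []

-- A's head block: the present, non-None priority fields in priority order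
def pvPrio (metadata : List (String × Option String)) : List (String × Option String) :=
  SIDECAR_BOOK_METADATA_ORDER.flatMap (pvEntry metadata)

-- A's tail block: the remaining non-None fields in insertion order
def pvRest (metadata : List (String × Option String)) : List (String × Option String) :=
  metadata.filter (fun kv => !(decide (kv.1 ∈ (pvPrio metadata).map Prod.fst)) && kv.2.isSome)

-- A's first pass over fresh distinct keys appends the per-field entries
theorem pv_foldA_items (metadata : List (String × Option String)) :
    ∀ (fs : List String) (d : PySem.Dict String (Option String)),
    fs.Nodup → (∀ f ∈ fs, d.contains f = false) →
    (fs.foldl (pvStepA metadata) d).items = d.items ++ fs.flatMap (pvEntry metadata) := by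
  intro fs
  induction fs with
  | nil => intro d _ _; simp
  | cons f fs ih =>
    intro d hnd hfresh
    rw [List.foldl_cons, List.flatMap_cons]
    have hff : f ∉ fs := (List.nodup_cons.mp hnd).1
    rcases hm : metadata.find? (fun kv => kv.1 == f) with _ | ⟨k, v⟩
    · have hstep : pvStepA metadata d f = d := by unfold pvStepA; rw [hm]
      have hent : pvEntry metadata f = [] := by unfold pvEntry; rw [hm]
      rw [hstep, ih d (List.nodup_cons.mp hnd).2
        (fun g hg => hfresh g (List.mem_cons_of_mem _ hg)), hent]
      simp
    · cases v with
      | none =>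
        have hstep : pvStepA metadata d f = d := by unfold pvStepA; rw [hm]
        have hent : pvEntry metadata f = [] := by unfold pvEntry; rw [hm]
        rw [hstep, ih d (List.nodup_cons.mp hnd).2
          (fun g hg => hfresh g (List.mem_cons_of_mem _ hg)), hent]
        simp
      | some w =>
        have hstep : pvStepA metadata d f = d.insert f (some w) := by unfold pvStepA; rw [hm]
        have hent : pvEntry metadata f = [(f, some w)] := by unfold pvEntry; rw [hm]
        have hfr : d.contains f = false := hfresh f List.mem_cons_self
        have hfresh' : ∀ g ∈ fs, (d.insert f (some w)).contains g = false := by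
          intro g hg
          have hne : g ≠ f := fun h => hff (h ▸ hg)
          rw [PySem.Dict.contains_insert]
          simp [hne, hfresh g (List.mem_cons_of_mem _ hg)]
        rw [hstep, ih (d.insert f (some w)) (List.nodup_cons.mp hnd).2 hfresh',
          PySem.Dict.items_insert, hfr, hent]
        simp

-- A's second pass appends exactly the non-None items whose key is not yet present
theorem pv_foldL2_items :
    ∀ (l : List (String × Option String)) (d : PySem.Dict String (Option String)),
    (l.map Prod.fst).Nodup →
    (l.foldl (fun d kv => if !(d.contains kv.1) && kv.2.isSome then d.insert kv.1 kv.2 else d) d).items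
      = d.items ++ l.filter (fun kv => !(d.contains kv.1) && kv.2.isSome) := by
  intro l
  induction l with
  | nil => intro d _; simp
  | cons kv l ih =>
    intro d hnd
    have hnd2 : (kv.1 :: l.map Prod.fst).Nodup := by simpa using hnd
    have hk : kv.1 ∉ l.map Prod.fst := (List.nodup_cons.mp hnd2).1
    have hnd' : (l.map Prod.fst).Nodup := (List.nodup_cons.mp hnd2).2
    rw [List.foldl_cons]
    by_cases hc : (!(d.contains kv.1) && kv.2.isSome) = true
    · have hcf : d.contains kv.1 = false := by
        have h := hc
        simp only [Bool.and_eq_true] at h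
        simpa using h.1
      have hcongr : l.filter (fun x => !((d.insert kv.1 kv.2).contains x.1) && x.2.isSome)
           = l.filter (fun x => !(d.contains x.1) && x.2.isSome) := by
        apply List.filter_congr
        intro x hx
        have hne : x.1 ≠ kv.1 := fun h => hk (h ▸ List.mem_map_of_mem hx)
        rw [PySem.Dict.contains_insert]
        simp [beq_false_of_ne hne]
      rw [if_pos hc, ih _ hnd', PySem.Dict.items_insert, hcf, hcongr]
      simp [hc]
    · rw [if_neg hc, ih _ hnd', List.filter_cons_of_neg (by simpa using hc)]

-- the index dict of B maps a name to its first position in the enumerated list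
theorem pv_indexDict_get? :
    ∀ (fs : List String), fs.Nodup → ∀ (s : Int) (d : PySem.Dict String Int) (k : String),
    ((PySem.List.enumerate fs s).foldl (fun d p => d.insert p.2 p.1) d).get? k
      = if k ∈ fs then some (s + (fs.idxOf k : Int)) else d.get? k := by
  intro fs
  induction fs with
  | nil => intro _ s d k; simp [PySem.List.enumerate_nil]
  | cons f fs ih =>
    intro hnd s d k
    rw [PySem.List.enumerate_cons, List.foldl_cons,
      ih (List.nodup_cons.mp hnd).2 (s + 1) (d.insert f s) k]
    by_cases hmem : k ∈ fs
    · rw [if_pos hmem, if_pos (List.mem_cons_of_mem f hmem)]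
      have hne : f ≠ k := fun h => (List.nodup_cons.mp hnd).1 (h ▸ hmem)
      rw [List.idxOf_cons_ne _ hne]
      push_cast
      ring_nf
    · rw [if_neg hmem]
      by_cases hkf : k = f
      · subst hkf
        rw [if_pos List.mem_cons_self, List.idxOf_cons_eq _ rfl,
          PySem.Dict.get?_insert_self]
        simp
      · rw [if_neg (by simp [hkf, hmem]), PySem.Dict.get?_insert]
        simp [hkf]

-- B's rank of a name is its index in the priority list (the length if absent)
theorem pv_rank (k : String) :
    (((PySem.List.enumerate SIDECAR_BOOK_METADATA_ORDER 0).foldl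
        (fun d p => d.insert p.2 p.1) PySem.Dict.empty).getD k
        (SIDECAR_BOOK_METADATA_ORDER.length : Int))
      = (SIDECAR_BOOK_METADATA_ORDER.idxOf k : Int) := by
  rw [PySem.Dict.getD_eq_get?_getD, pv_indexDict_get? _ (by decide) 0 _ k]
  by_cases h : k ∈ SIDECAR_BOOK_METADATA_ORDER
  · simp [h]
  · rw [if_neg h, List.idxOf_eq_length h]
    simp [PySem.Dict.get?_empty]

-- first-match lookup of a present key under distinct keys returns that pair
theorem pv_find?_eq :
    ∀ (l : List (String × Option String)), (l.map Prod.fst).Nodup →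
    ∀ (kv : String × Option String), kv ∈ l → l.find? (fun p => p.1 == kv.1) = some kv := by
  intro l
  induction l with
  | nil => intro _ kv h; cases h
  | cons p l ih =>
    intro hnd kv hm
    have hnd2 : (p.1 :: l.map Prod.fst).Nodup := by simpa using hnd
    have hp1 : p.1 ∉ l.map Prod.fst := (List.nodup_cons.mp hnd2).1
    have hnd' : (l.map Prod.fst).Nodup := (List.nodup_cons.mp hnd2).2
    rcases List.mem_cons.mp hm with rfl | hm'
    · rw [List.find?_cons_of_pos (by simp)]
    · have hne : p.1 ≠ kv.1 := fun h => hp1 (h ▸ List.mem_map_of_mem hm')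
      rw [List.find?_cons_of_neg (by simpa using hne), ih hnd' kv hm']

-- filtering by one key under distinct keys yields that key's entry
theorem pv_filter_key :
    ∀ (l : List (String × Option String)), (l.map Prod.fst).Nodup → ∀ (f : String),
    l.filter (fun kv => kv.2.isSome && kv.1 == f) = pvEntry l f := by
  intro l
  induction l with
  | nil => intro _ f; simp [pvEntry]
  | cons p l ih =>
    intro hnd f
    obtain ⟨p1, p2⟩ := p
    have hnd2 : (p1 :: l.map Prod.fst).Nodup := by simpa using hnd
    have hp1 : p1 ∉ l.map Prod.fst := (List.nodup_cons.mp hnd2).1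
    have hnd' : (l.map Prod.fst).Nodup := (List.nodup_cons.mp hnd2).2
    by_cases hpf : p1 = f
    · subst hpf
      have htail : l.filter (fun kv => kv.2.isSome && kv.1 == p1) = [] := by
        apply List.filter_eq_nil_iff.mpr
        intro x hx hcond
        simp only [Bool.and_eq_true] at hcond
        exact hp1 ((beq_iff_eq.mp hcond.2) ▸ List.mem_map_of_mem hx)
      unfold pvEntry
      rw [List.find?_cons_of_pos (by simp)]
      cases p2 with
      | none =>
        rw [List.filter_cons_of_neg (by simp)]
        rw [htail]
      | some w =>
        rw [List.filter_cons_of_pos (by simp)]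
        rw [htail]
    · unfold pvEntry
      rw [List.find?_cons_of_neg (by simpa using hpf)]
      rw [List.filter_cons_of_neg (by simp [hpf])]
      exact ih hnd' f

-- the keys of A's head block form a sublist of the priority list
theorem pv_prioKeys_sublist (metadata : List (String × Option String)) :
    ∀ (fs : List String), ((fs.flatMap (pvEntry metadata)).map Prod.fst).Sublist fs := by
  intro fs
  induction fs with
  | nil => simp
  | cons f fs ih =>
    rw [List.flatMap_cons, List.map_append]
    rcases hm : metadata.find? (fun kv => kv.1 == f) with _ | ⟨k, v⟩
    · have hent : pvEntry metadata f = [] := by unfold pvEntry; rw [hm]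
      rw [hent]
      simpa using ih.cons f
    · cases v with
      | none =>
        have hent : pvEntry metadata f = [] := by unfold pvEntry; rw [hm]
        rw [hent]
        simpa using ih.cons f
      | some w =>
        have hent : pvEntry metadata f = [(f, some w)] := by unfold pvEntry; rw [hm]
        rw [hent]
        simpa using ih.cons₂ f

-- a present non-None key that is a priority field appears among the head keys
theorem pv_mem_prioKeys (metadata : List (String × Option String))
    (hnd : (metadata.map Prod.fst).Nodup) (fs : List String)
    (kv : String × Option String) (hkv : kv ∈ metadata) (hs : kv.2.isSome = true)
    (hf : kv.1 ∈ fs) : kv.1 ∈ (fs.flatMap (pvEntry metadata)).map Prod.fst := by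
  obtain ⟨a, b⟩ := kv
  obtain ⟨v, hv⟩ := Option.isSome_iff_exists.mp hs
  subst hv
  have hent : pvEntry metadata a = [(a, some v)] := by
    unfold pvEntry
    rw [pv_find?_eq metadata hnd (a, some v) hkv]
  exact List.mem_map.mpr ⟨(a, some v),
    List.mem_flatMap.mpr ⟨a, hf, by rw [hent]; simp⟩, rfl⟩

-- bucket j (j < 21) of B is exactly A's entry for the j-th priority field
theorem pv_bucket_lt (metadata : List (String × Option String))
    (hnd : (metadata.map Prod.fst).Nodup) (j : Nat)
    (hj : j < SIDECAR_BOOK_METADATA_ORDER.length) :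
    (metadata.filter (fun kv => kv.2.isSome)).filter
        (fun kv => decide (SIDECAR_BOOK_METADATA_ORDER.idxOf kv.1 = j))
      = pvEntry metadata (SIDECAR_BOOK_METADATA_ORDER[j]) := by
  rw [List.filter_filter]
  rw [← pv_filter_key metadata hnd (SIDECAR_BOOK_METADATA_ORDER[j])]
  apply List.filter_congr
  intro kv _
  have hidx : SIDECAR_BOOK_METADATA_ORDER.idxOf (SIDECAR_BOOK_METADATA_ORDER[j]) = j :=
    List.Nodup.idxOf_getElem (by decide) j hj
  have hb : (decide (SIDECAR_BOOK_METADATA_ORDER.idxOf kv.1 = j))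
      = (kv.1 == SIDECAR_BOOK_METADATA_ORDER[j]) := by
    by_cases h : kv.1 = SIDECAR_BOOK_METADATA_ORDER[j]
    · simp [h, hidx]
    · have hne : SIDECAR_BOOK_METADATA_ORDER.idxOf kv.1 ≠ j := by
        intro hh
        apply h
        have hlt : SIDECAR_BOOK_METADATA_ORDER.idxOf kv.1 < SIDECAR_BOOK_METADATA_ORDER.length := by
          rw [hh]; exact hj
        have h2 := List.getElem_idxOf hlt
        simp only [hh] at h2
        exact h2.symm
      simp [h, hne]
  rw [hb, Bool.and_comm]

-- bucket 21 of B is exactly A's tail block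
theorem pv_bucket_last (metadata : List (String × Option String))
    (hnd : (metadata.map Prod.fst).Nodup) :
    (metadata.filter (fun kv => kv.2.isSome)).filter
        (fun kv => decide (SIDECAR_BOOK_METADATA_ORDER.idxOf kv.1 = 21))
      = pvRest metadata := by
  rw [List.filter_filter]
  unfold pvRest
  apply List.filter_congr
  intro kv hkv
  by_cases hs : kv.2.isSome = true
  · have h1 : SIDECAR_BOOK_METADATA_ORDER.idxOf kv.1 = 21 ↔ kv.1 ∉ SIDECAR_BOOK_METADATA_ORDER := by
      constructor
      · intro h hmem
        have hlt := List.idxOf_lt_length_iff.mpr hmem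
        rw [h] at hlt
        exact absurd hlt (by decide)
      · intro h
        rw [List.idxOf_eq_length h]
        rfl
    have h2 : kv.1 ∈ (pvPrio metadata).map Prod.fst ↔ kv.1 ∈ SIDECAR_BOOK_METADATA_ORDER := by
      constructor
      · intro h
        exact (pv_prioKeys_sublist metadata SIDECAR_BOOK_METADATA_ORDER).subset h
      · intro h
        exact pv_mem_prioKeys metadata hnd _ kv hkv hs h
    have hlen : SIDECAR_BOOK_METADATA_ORDER.length = 21 := rfl
    by_cases h : kv.1 ∈ SIDECAR_BOOK_METADATA_ORDER <;>
      simp [hs, h, h1, h2, hlen]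
  · have hs' : kv.2.isSome = false := by simpa using hs
    simp [hs']

-- the first 21 buckets concatenate to A's head block
theorem pv_buckets (metadata : List (String × Option String))
    (hnd : (metadata.map Prod.fst).Nodup) :
    ∀ (n : Nat), n ≤ 21 →
    (List.range' (21 - n) n).flatMap
        (fun j => (metadata.filter (fun kv => kv.2.isSome)).filter
          (fun kv => decide (SIDECAR_BOOK_METADATA_ORDER.idxOf kv.1 = j)))
      = (SIDECAR_BOOK_METADATA_ORDER.drop (21 - n)).flatMap (pvEntry metadata) := by
  intro n
  induction n with
  | zero =>
    intro _
    rw [show (21 - 0) = SIDECAR_BOOK_METADATA_ORDER.length from rfl, List.drop_length]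
    simp
  | succ n ih =>
    intro hn
    have hc : 21 - (n + 1) < SIDECAR_BOOK_METADATA_ORDER.length := by
      show 21 - (n + 1) < 21
      omega
    have hs : 21 - (n + 1) + 1 = 21 - n := by omega
    have hravel : List.range' (21 - (n + 1)) (n + 1)
        = (21 - (n + 1)) :: List.range' (21 - n) n := by
      rw [List.range'_succ, hs]
    have hdrop : SIDECAR_BOOK_METADATA_ORDER.drop (21 - (n + 1))
        = SIDECAR_BOOK_METADATA_ORDER[21 - (n + 1)] ::
          SIDECAR_BOOK_METADATA_ORDER.drop (21 - n) := by
      rw [List.drop_eq_getElem_cons hc, hs]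
    rw [hravel, List.flatMap_cons, ih (by omega), hdrop, List.flatMap_cons,
      pv_bucket_lt metadata hnd _ hc]

-- the output keys are distinct
theorem pv_out_keys_nodup (metadata : List (String × Option String))
    (hnd : (metadata.map Prod.fst).Nodup) :
    ((pvPrio metadata ++ pvRest metadata).map Prod.fst).Nodup := by
  rw [List.map_append, List.nodup_append]
  refine ⟨?_, ?_, ?_⟩
  · exact ((pv_prioKeys_sublist metadata SIDECAR_BOOK_METADATA_ORDER)).nodup (by decide)
  · have hsub : (pvRest metadata).Sublist metadata := by
      unfold pvRest
      exact List.filter_sublist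
    exact ((hsub.map Prod.fst)).nodup hnd
  · intro a ha b hb
    obtain ⟨x, hx, rfl⟩ := List.mem_map.mp hb
    have hnot : x.1 ∉ (pvPrio metadata).map Prod.fst := by
      have hcond := List.of_mem_filter hx
      intro hmem
      simp [hmem] at hcond
    exact fun heq => hnot (heq ▸ ha)

-- A computes head ++ tail
theorem pv_A_eq (metadata : List (String × Option String))
    (hnd : (metadata.map Prod.fst).Nodup) :
    normalize_sidecar_metadata metadata = pvPrio metadata ++ pvRest metadata := by
  unfold normalize_sidecar_metadata
  rw [pv_foldL2_items metadata _ hnd]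
  have hitems : (SIDECAR_BOOK_METADATA_ORDER.foldl (pvStepA metadata) PySem.Dict.empty).items
      = pvPrio metadata := by
    rw [pv_foldA_items metadata SIDECAR_BOOK_METADATA_ORDER PySem.Dict.empty (by decide)
      (fun f _ => PySem.Dict.contains_empty f)]
    rw [show (PySem.Dict.empty : PySem.Dict String (Option String)).items = [] from rfl]
    simp [pvPrio]
  rw [hitems]
  congr 1
  unfold pvRest
  apply List.filter_congr
  intro kv _
  have hcont : (SIDECAR_BOOK_METADATA_ORDER.foldl (pvStepA metadata) PySem.Dict.empty).contains kv.1
      = decide (kv.1 ∈ (pvPrio metadata).map Prod.fst) := by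
    rw [PySem.Dict.contains_eq_decide_mem_keys, decide_eq_decide]
    simp only [PySem.Dict.keys, hitems]
  rw [hcont]

-- B computes head ++ tail too
theorem pv_B_eq (metadata : List (String × Option String))
    (hnd : (metadata.map Prod.fst).Nodup) :
    normalize_sidecar_metadata_alt metadata = pvPrio metadata ++ pvRest metadata := by
  simp only [normalize_sidecar_metadata_alt]
  have hrank : (metadata.filter (fun kv => kv.2.isSome)).map
        (fun kv => (((PySem.List.enumerate SIDECAR_BOOK_METADATA_ORDER 0).foldl
            (fun d p => d.insert p.2 p.1) PySem.Dict.empty).getD kv.1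
            (SIDECAR_BOOK_METADATA_ORDER.length : Int), kv))
      = (metadata.filter (fun kv => kv.2.isSome)).map
        (fun kv => ((SIDECAR_BOOK_METADATA_ORDER.idxOf kv.1 : Int), kv)) := by
    apply List.map_congr_left
    intro kv _
    rw [pv_rank]
  rw [hrank]
  have hbody : ∀ (r : Int),
      (((metadata.filter (fun kv => kv.2.isSome)).map
        (fun kv => ((SIDECAR_BOOK_METADATA_ORDER.idxOf kv.1 : Int), kv))).filter
        (fun p => p.1 == r)).map (fun p => p.2)
      = (metadata.filter (fun kv => kv.2.isSome)).filter
          (fun kv => ((SIDECAR_BOOK_METADATA_ORDER.idxOf kv.1 : Int) == r)) := by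
    intro r
    rw [List.filter_map, List.map_map]
    simp [Function.comp_def]
  have hrange : PySem.List.pyRange 0 ((SIDECAR_BOOK_METADATA_ORDER.length : Int) + 1) 1
      = (List.range 22).map (fun k => ((k : Nat) : Int)) := by
    rw [show ((SIDECAR_BOOK_METADATA_ORDER.length : Int) + 1) = ((22 : Nat) : Int) from by
      show ((21 : Nat) : Int) + 1 = ((22 : Nat) : Int)
      norm_num]
    rw [PySem.List.pyRange_one]
    simp
  rw [hrange, List.flatMap_map]
  have hfun : (fun a : Nat => (((metadata.filter (fun kv => kv.2.isSome)).map
        (fun kv => ((SIDECAR_BOOK_METADATA_ORDER.idxOf kv.1 : Int), kv))).filter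
        (fun p => p.1 == ((a : Int)))).map (fun p => p.2))
      = (fun j : Nat => (metadata.filter (fun kv => kv.2.isSome)).filter
          (fun kv => decide (SIDECAR_BOOK_METADATA_ORDER.idxOf kv.1 = j))) := by
    funext j
    rw [hbody]
    apply List.filter_congr
    intro kv _
    by_cases h : SIDECAR_BOOK_METADATA_ORDER.idxOf kv.1 = j <;> simp [h]
  rw [hfun, List.range_succ, List.flatMap_append]
  have hfirst : (List.range 21).flatMap
      (fun j : Nat => (metadata.filter (fun kv => kv.2.isSome)).filter
        (fun kv => decide (SIDECAR_BOOK_METADATA_ORDER.idxOf kv.1 = j)))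
      = pvPrio metadata := by
    rw [List.range_eq_range']
    have := pv_buckets metadata hnd 21 (by omega)
    simpa using this
  rw [hfirst, List.flatMap_cons, List.flatMap_nil, List.append_nil,
    pv_bucket_last metadata hnd]
  rw [PySem.Dict.items_foldl_insert_fresh (pvPrio metadata ++ pvRest metadata)
    Prod.fst Prod.snd PySem.Dict.empty
    (fun a _ => PySem.Dict.contains_empty a.1) (pv_out_keys_nodup metadata hnd)]
  rw [show (PySem.Dict.empty : PySem.Dict String (Option String)).items = [] from rfl]
  simp

-- ===== VERDICT (by name: the statement is the Claim_ definition above) =====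
theorem normalize_sidecar_metadata_spec : Claim_equal_normalize_sidecar_metadata := by
  intro metadata _ hnd
  unfold Pre_normalize_sidecar_metadata at hnd
  unfold Spec_normalize_sidecar_metadata
  rw [pv_A_eq metadata hnd, pv_B_eq metadata hnd]
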